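-- pv_equiv track=rewrite | github.com/offkrse/tg-par-vk | test_bot.py | broker_channel_group
-- ===== SOURCE A (Python) =====
-- def broker_channel_group(cid: str, day_number: int) -> str:
--     """Определяет название TXT файла по channel_id"""
--     cid = str(cid)
--     mapping = {
--         "КР ДОП_3": [915, 917, 918, 919],
--         "КР 1": [12063],
--         "КР 2": [11896],
--         "КР ДОП_4": [3587, 7389, 7553, 8614, 8732],
--         "КР ДОП_5": [9189, 9190, 9191, 9192, 9193, 9194, 9413, 9441, 9443, 9453, 9889, 9899],
--         "КР ДОП_6": [10141, 10240],
--         "КР ДОП_7": [11682, 11729],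
--         "КР ДОП_8": [12873],
--         "КР ДОП_9": [16263],
--     }
--     for name, ids in mapping.items():
--         if cid is None:
--             continue
--         if str(cid).isdigit() and int(cid) in ids:
--             return f"{name} ({day_number}).txt"
--     return f"КР ДОП_10 ({day_number}).txt"
-- ===== SOURCE B (Python) =====
-- _MAPPING = {
--     "КР ДОП_3": [915, 917, 918, 919],
--     "КР 1": [12063],
--     "КР 2": [11896],
--     "КР ДОП_4": [3587, 7389, 7553, 8614, 8732],
--     "КР ДОП_5": [9189, 9190, 9191, 9192, 9193, 9194, 9413, 9441, 9443, 9453, 9889, 9899],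
--     "КР ДОП_6": [10141, 10240],
--     "КР ДОП_7": [11682, 11729],
--     "КР ДОП_8": [12873],
--     "КР ДОП_9": [16263],
-- }
--
-- # flat inverted index: channel id -> group name (built once at import time)
-- _ID_TO_NAME = {i: name for name, ids in _MAPPING.items() for i in ids}
--
--
-- def broker_channel_group(cid: str, day_number: int) -> str:
--     """Определяет название TXT файла по channel_id"""
--     cid = str(cid)
--     if cid.isdigit():
--         name = _ID_TO_NAME.get(int(cid))
--         if name is not None:
--             return f"{name} ({day_number}).txt"
--     return f"КР ДОП_10 ({day_number}).txt"
-- ===== Notes on version B (the rewrite author's own statement) =====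
-- stated objective: idiomatic
-- what changed: Replaces the per-call scan over the name->ids table (membership test in each id list) with a flat inverted dict id->name built once at import time, so the body is a single lookup.
import Mathlib
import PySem

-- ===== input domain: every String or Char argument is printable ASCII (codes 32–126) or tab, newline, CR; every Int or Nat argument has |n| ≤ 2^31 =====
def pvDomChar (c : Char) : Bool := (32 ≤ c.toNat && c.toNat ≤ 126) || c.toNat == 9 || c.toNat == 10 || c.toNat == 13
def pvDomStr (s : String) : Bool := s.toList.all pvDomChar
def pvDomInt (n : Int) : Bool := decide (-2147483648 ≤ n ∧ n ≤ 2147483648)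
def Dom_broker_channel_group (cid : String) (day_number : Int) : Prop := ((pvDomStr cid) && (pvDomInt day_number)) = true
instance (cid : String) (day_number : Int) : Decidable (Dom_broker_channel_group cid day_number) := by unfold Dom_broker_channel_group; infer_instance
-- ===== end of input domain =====

-- B replaces A's per-call scan of the name → ids table with a flat inverted dict id → name built once; one lookup per call (return value only; neither version mutates anything).

-- ===== PORT A =====
-- the dict literal 'mapping' of A, as its insertion-ordered item list
def brokerMapping : List (String × List Int) :=
  [("КР ДОП_3", [915, 917, 918, 919]),
   ("КР 1", [12063]),
   ("КР 2", [11896]),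
   ("КР ДОП_4", [3587, 7389, 7553, 8614, 8732]),
   ("КР ДОП_5", [9189, 9190, 9191, 9192, 9193, 9194, 9413, 9441, 9443, 9453, 9889, 9899]),
   ("КР ДОП_6", [10141, 10240]),
   ("КР ДОП_7", [11682, 11729]),
   ("КР ДОП_8", [12873]),
   ("КР ДОП_9", [16263])]

-- the 'for name, ids in mapping.items()' loop with its early return; the 'if cid is None: continue'
-- guard never fires (cid : str is never None) and is dropped; int(cid) is guarded by isdigit, so getD 0 is exact
def brokerLoop (cid : String) (day_number : Int) : List (String × List Int) → String
  | [] => "КР ДОП_10 (" ++ PySem.Int.toStr day_number ++ ").txt"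
  | (name, ids) :: rest =>
      if PySem.Str.strIsdigit cid && decide (((PySem.Int.ofStr? cid).getD 0) ∈ ids) then
        name ++ " (" ++ PySem.Int.toStr day_number ++ ").txt"
      else brokerLoop cid day_number rest

def broker_channel_group (cid : String) (day_number : Int) : String :=
  brokerLoop cid day_number brokerMapping

-- ===== PORT B =====
-- Source B's dict comprehension (_MAPPING is the same table literal as A's; kept once as brokerMapping)
-- {i: name for name, ids in _MAPPING.items() for i in ids}
def brokerIdToName : PySem.Dict Int String :=
  PySem.Dict.ofList (brokerMapping.flatMap (fun p => p.2.map (fun i => (i, p.1))))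

def broker_channel_group_alt (cid : String) (day_number : Int) : String :=
  if PySem.Str.strIsdigit cid then
    match brokerIdToName.get? ((PySem.Int.ofStr? cid).getD 0) with
    | some name => name ++ " (" ++ PySem.Int.toStr day_number ++ ").txt"
    | none => "КР ДОП_10 (" ++ PySem.Int.toStr day_number ++ ").txt"
  else "КР ДОП_10 (" ++ PySem.Int.toStr day_number ++ ").txt"

-- ===== PRECONDITION & SPEC =====
def Spec_broker_channel_group (cid : String) (day_number : Int) (out : String) : Prop := out = broker_channel_group_alt cid day_number
instance (cid : String) (day_number : Int) (out : String) : Decidable (Spec_broker_channel_group cid day_number out) := by unfold Spec_broker_channel_group; infer_instance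

-- ===== CLAIM (what is proved, stated in full; the proofs are below) =====
def Claim_equal_broker_channel_group : Prop := ∀ (cid : String) (day_number : Int), Dom_broker_channel_group cid day_number → Spec_broker_channel_group cid day_number (broker_channel_group cid day_number)

-- ===== LEMMAS AND PROOFS =====
theorem broker_eq (cid : String) (day_number : Int) :
    broker_channel_group cid day_number = broker_channel_group_alt cid day_number := by
  by_cases hd : PySem.Chars.strIsdigit cid.toList = true
  case neg =>
    simp [broker_channel_group, broker_channel_group_alt, brokerMapping, brokerLoop, hd]
  case pos =>
    simp only [broker_channel_group, broker_channel_group_alt, brokerMapping, brokerLoop,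
      PySem.Str.strIsdigit_eq, hd, Bool.true_and, if_true, decide_eq_true_eq, List.mem_cons,
      List.not_mem_nil, or_false]
    by_cases h0 : (PySem.Int.ofStr? cid).getD 0 = 915
    · rw [h0, show brokerIdToName.get? 915 = some "КР ДОП_3" from rfl]; norm_num
    by_cases h1 : (PySem.Int.ofStr? cid).getD 0 = 917
    · rw [h1, show brokerIdToName.get? 917 = some "КР ДОП_3" from rfl]; norm_num
    by_cases h2 : (PySem.Int.ofStr? cid).getD 0 = 918
    · rw [h2, show brokerIdToName.get? 918 = some "КР ДОП_3" from rfl]; norm_num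
    by_cases h3 : (PySem.Int.ofStr? cid).getD 0 = 919
    · rw [h3, show brokerIdToName.get? 919 = some "КР ДОП_3" from rfl]; norm_num
    by_cases h4 : (PySem.Int.ofStr? cid).getD 0 = 12063
    · rw [h4, show brokerIdToName.get? 12063 = some "КР 1" from rfl]; norm_num
    by_cases h5 : (PySem.Int.ofStr? cid).getD 0 = 11896
    · rw [h5, show brokerIdToName.get? 11896 = some "КР 2" from rfl]; norm_num
    by_cases h6 : (PySem.Int.ofStr? cid).getD 0 = 3587
    · rw [h6, show brokerIdToName.get? 3587 = some "КР ДОП_4" from rfl]; norm_num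
    by_cases h7 : (PySem.Int.ofStr? cid).getD 0 = 7389
    · rw [h7, show brokerIdToName.get? 7389 = some "КР ДОП_4" from rfl]; norm_num
    by_cases h8 : (PySem.Int.ofStr? cid).getD 0 = 7553
    · rw [h8, show brokerIdToName.get? 7553 = some "КР ДОП_4" from rfl]; norm_num
    by_cases h9 : (PySem.Int.ofStr? cid).getD 0 = 8614
    · rw [h9, show brokerIdToName.get? 8614 = some "КР ДОП_4" from rfl]; norm_num
    by_cases h10 : (PySem.Int.ofStr? cid).getD 0 = 8732
    · rw [h10, show brokerIdToName.get? 8732 = some "КР ДОП_4" from rfl]; norm_num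
    by_cases h11 : (PySem.Int.ofStr? cid).getD 0 = 9189
    · rw [h11, show brokerIdToName.get? 9189 = some "КР ДОП_5" from rfl]; norm_num
    by_cases h12 : (PySem.Int.ofStr? cid).getD 0 = 9190
    · rw [h12, show brokerIdToName.get? 9190 = some "КР ДОП_5" from rfl]; norm_num
    by_cases h13 : (PySem.Int.ofStr? cid).getD 0 = 9191
    · rw [h13, show brokerIdToName.get? 9191 = some "КР ДОП_5" from rfl]; norm_num
    by_cases h14 : (PySem.Int.ofStr? cid).getD 0 = 9192
    · rw [h14, show brokerIdToName.get? 9192 = some "КР ДОП_5" from rfl]; norm_num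
    by_cases h15 : (PySem.Int.ofStr? cid).getD 0 = 9193
    · rw [h15, show brokerIdToName.get? 9193 = some "КР ДОП_5" from rfl]; norm_num
    by_cases h16 : (PySem.Int.ofStr? cid).getD 0 = 9194
    · rw [h16, show brokerIdToName.get? 9194 = some "КР ДОП_5" from rfl]; norm_num
    by_cases h17 : (PySem.Int.ofStr? cid).getD 0 = 9413
    · rw [h17, show brokerIdToName.get? 9413 = some "КР ДОП_5" from rfl]; norm_num
    by_cases h18 : (PySem.Int.ofStr? cid).getD 0 = 9441
    · rw [h18, show brokerIdToName.get? 9441 = some "КР ДОП_5" from rfl]; norm_num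
    by_cases h19 : (PySem.Int.ofStr? cid).getD 0 = 9443
    · rw [h19, show brokerIdToName.get? 9443 = some "КР ДОП_5" from rfl]; norm_num
    by_cases h20 : (PySem.Int.ofStr? cid).getD 0 = 9453
    · rw [h20, show brokerIdToName.get? 9453 = some "КР ДОП_5" from rfl]; norm_num
    by_cases h21 : (PySem.Int.ofStr? cid).getD 0 = 9889
    · rw [h21, show brokerIdToName.get? 9889 = some "КР ДОП_5" from rfl]; norm_num
    by_cases h22 : (PySem.Int.ofStr? cid).getD 0 = 9899
    · rw [h22, show brokerIdToName.get? 9899 = some "КР ДОП_5" from rfl]; norm_num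
    by_cases h23 : (PySem.Int.ofStr? cid).getD 0 = 10141
    · rw [h23, show brokerIdToName.get? 10141 = some "КР ДОП_6" from rfl]; norm_num
    by_cases h24 : (PySem.Int.ofStr? cid).getD 0 = 10240
    · rw [h24, show brokerIdToName.get? 10240 = some "КР ДОП_6" from rfl]; norm_num
    by_cases h25 : (PySem.Int.ofStr? cid).getD 0 = 11682
    · rw [h25, show brokerIdToName.get? 11682 = some "КР ДОП_7" from rfl]; norm_num
    by_cases h26 : (PySem.Int.ofStr? cid).getD 0 = 11729
    · rw [h26, show brokerIdToName.get? 11729 = some "КР ДОП_7" from rfl]; norm_num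
    by_cases h27 : (PySem.Int.ofStr? cid).getD 0 = 12873
    · rw [h27, show brokerIdToName.get? 12873 = some "КР ДОП_8" from rfl]; norm_num
    by_cases h28 : (PySem.Int.ofStr? cid).getD 0 = 16263
    · rw [h28, show brokerIdToName.get? 16263 = some "КР ДОП_9" from rfl]; norm_num
    rw [show brokerIdToName.get? ((PySem.Int.ofStr? cid).getD 0) = none from ?_]
    · simp only [h0, h1, h2, h3, h4, h5, h6, h7, h8, h9, h10, h11, h12, h13, h14, h15, h16, h17, h18, h19, h20, h21, h22, h23, h24, h25, h26, h27, h28]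
      norm_num
    · rw [PySem.Dict.get?_eq_none_iff_not_mem_keys]
      rw [show brokerIdToName.keys = [915, 917, 918, 919, 12063, 11896, 3587, 7389, 7553, 8614, 8732, 9189, 9190, 9191, 9192, 9193, 9194, 9413, 9441, 9443, 9453, 9889, 9899, 10141, 10240, 11682, 11729, 12873, 16263] from rfl]
      simp only [List.mem_cons, List.not_mem_nil, or_false]
      push Not
      exact ⟨h0, h1, h2, h3, h4, h5, h6, h7, h8, h9, h10, h11, h12, h13, h14, h15, h16, h17, h18, h19, h20, h21, h22, h23, h24, h25, h26, h27, h28⟩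

-- ===== VERDICT (by name: the statement is the Claim_ definition above) =====
theorem broker_channel_group_spec : Claim_equal_broker_channel_group := by
  intro cid day_number _
  unfold Spec_broker_channel_group
  exact broker_eq cid day_number
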